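-- pv_equiv track=rewrite | github.com/YagmurTaze/CodeStepByStep-Python | strings/switch_pairs.py | switch_pairs
-- ===== SOURCE A (Python) =====
-- def switch_pairs(st):
--     last = ""
--     new_str = ""
--     if len(st) % 2 == 1:
--         last = st[-1]
--         st = st[:len(st)-1]
--     for i in range (0,len(st),2):
--         new_str += st[i+1] + st[i]
--     return new_str + last
-- ===== SOURCE B (Python) =====
-- def switch_pairs(st):
--     it = iter(st)
--     out = []
--     for a in it:
--         b = next(it, None)
--         if b is None:
--             out.append(a)
--         else:
--             out.append(b)
--             out.append(a)
--     return ''.join(out)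
-- ===== Notes on version B (the rewrite author's own statement) =====
-- stated objective: idiomatic
-- what changed: B replaces A's odd-length pre-split, stride-2 index loop and repeated string concatenation by a single iterator-style pass that consumes two characters at a time and joins a list once.
import Mathlib
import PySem

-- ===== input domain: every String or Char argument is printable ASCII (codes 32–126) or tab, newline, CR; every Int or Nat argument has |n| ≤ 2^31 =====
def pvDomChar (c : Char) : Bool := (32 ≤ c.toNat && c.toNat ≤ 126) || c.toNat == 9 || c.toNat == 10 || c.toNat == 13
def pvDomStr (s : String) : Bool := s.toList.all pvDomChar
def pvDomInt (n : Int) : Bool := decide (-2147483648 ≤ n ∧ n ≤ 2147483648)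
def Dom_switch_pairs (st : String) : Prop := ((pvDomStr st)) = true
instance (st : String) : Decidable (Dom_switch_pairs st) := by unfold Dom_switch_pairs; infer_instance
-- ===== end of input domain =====

-- B replaces A's odd-length pre-split plus stride-2 index loop by a single iterator-style
-- pass that consumes two characters at a time (objective: simpler/idiomatic; no speed claim).

-- ===== PORT A =====
-- A: split off the last char if the length is odd, then 'for i in range(0, len(st), 2): new_str += st[i+1] + st[i]'.
def switch_pairs (st : String) : String :=
  let cs0 := st.toList
  let body_last : List Char × List Char :=
    if cs0.length % 2 == 1 then
      (PySem.List.slice cs0 none (some ((cs0.length : Int) - 1)),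
       [PySem.List.pyGetD cs0 (-1) ' '])
    else (cs0, [])
  let cs := body_last.1
  let new_str := (PySem.List.pyRange 0 (cs.length : Int) 2).foldl
      (fun acc i => acc ++ [PySem.List.pyGetD cs (i + 1) ' ', PySem.List.pyGetD cs i ' '])
      ([] : List Char)
  String.ofList (new_str ++ body_last.2)

-- ===== PORT B =====
-- B: one pass over the characters, taking two at a time ('for a in it: b = next(it, None); …').
def pvPairsSwap : List Char → List Char
  | [] => []
  | [a] => [a]
  | a :: b :: rest => b :: a :: pvPairsSwap rest

def switch_pairs_alt (st : String) : String :=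
  String.ofList (pvPairsSwap st.toList)

-- ===== PRECONDITION & SPEC =====
def Spec_switch_pairs (st : String) (out : String) : Prop := out = switch_pairs_alt st
instance (st : String) (out : String) : Decidable (Spec_switch_pairs st out) := by unfold Spec_switch_pairs; infer_instance

-- ===== CLAIM (what is proved, stated in full; the proofs are below) =====
def Claim_equal_switch_pairs : Prop := ∀ (st : String), Dom_switch_pairs st → Spec_switch_pairs st (switch_pairs st)

-- ===== LEMMAS AND PROOFS =====

-- shifting a cons past a nonnegative Python index
theorem pvGetD_cons_shift (x : Char) (xs : List Char) (i : Int) (d : Char) (h : 0 ≤ i) :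
    PySem.List.pyGetD (x :: xs) (i + 1) d = PySem.List.pyGetD xs i d := by
  obtain ⟨n, rfl⟩ := Int.eq_ofNat_of_zero_le h
  have : ((n : Int) + 1) = ((n + 1 : Nat) : Int) := by push_cast; ring
  rw [this, PySem.List.pyGetD_natCast, PySem.List.pyGetD_natCast]
  simp

-- range(0, n+2, 2) = 0 :: (range(0, n, 2) shifted by 2)
theorem pvRange_two_cons (n : Nat) :
    PySem.List.pyRange 0 ((n : Int) + 2) 2
      = 0 :: (PySem.List.pyRange 0 (n : Int) 2).map (· + 2) := by
  rw [PySem.List.pyRange_of_pos _ _ (by norm_num),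
      PySem.List.pyRange_of_pos _ _ (by norm_num : (0:Int) < 2)]
  have h1 : (if (0:Int) < (n:Int) + 2 then (((n:Int) + 2 - 0 + 2 - 1) / 2).toNat else 0)
      = (if (0:Int) < (n:Int) then (((n:Int) - 0 + 2 - 1) / 2).toNat else 0) + 1 := by
    split_ifs <;> omega
  rw [h1, List.range_succ_eq_map]
  simp only [List.map_cons, List.map_map]
  refine List.cons_eq_cons.mpr ⟨by norm_num, ?_⟩
  apply List.map_congr_left
  intro k _
  simp [Nat.succ_eq_add_one]
  ring

-- A's even-length loop computes B's pairwise swap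
theorem pvFold_even : ∀ (cs : List Char) (acc : List Char), cs.length % 2 = 0 →
    (PySem.List.pyRange 0 (cs.length : Int) 2).foldl
        (fun a i => a ++ [PySem.List.pyGetD cs (i + 1) ' ', PySem.List.pyGetD cs i ' '])
        acc
      = acc ++ pvPairsSwap cs := by
  intro cs
  induction cs using pvPairsSwap.induct with
  | case1 =>
      intro acc _
      rw [show (([] : List Char).length : Int) = 0 by simp,
          PySem.List.pyRange_of_pos 0 0 (by norm_num : (0:Int) < 2)]
      simp [pvPairsSwap]
  | case2 a =>
      intro acc h
      simp at h
  | case3 a b rest ih =>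
      intro acc h
      have hlen : ((a :: b :: rest).length : Int) = (rest.length : Int) + 2 := by
        simp; ring
      rw [hlen, pvRange_two_cons, List.foldl_cons, List.foldl_map]
      have h0 : PySem.List.pyGetD (a :: b :: rest) 0 ' ' = a := by
        simp [PySem.List.pyGetD_zero_cons]
      have h1 : PySem.List.pyGetD (a :: b :: rest) (0 + 1) ' ' = b := by
        norm_num
        rw [PySem.List.pyGetD_ofNat' (a :: b :: rest) 1 ' ']
        rfl
      rw [h0, h1]
      have hcong := PySem.List.foldl_congr_mem (PySem.List.pyRange 0 (rest.length : Int) 2)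
        (fun x i => x ++ [PySem.List.pyGetD (a :: b :: rest) (i + 2 + 1) ' ',
                          PySem.List.pyGetD (a :: b :: rest) (i + 2) ' '])
        (fun x i => x ++ [PySem.List.pyGetD rest (i + 1) ' ', PySem.List.pyGetD rest i ' '])
        (acc ++ [b, a])
        (by
          intro acc' i hi
          have hpos : (0:Int) ≤ i := by
            have := (PySem.List.mem_pyRange_iff_of_pos (by norm_num : (0:Int) < 2) i).1 hi
            omega
          dsimp only
          have e1 : i + 2 = (i + 1) + 1 := by ring
          rw [e1,
              pvGetD_cons_shift a _ _ _ (by omega),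
              pvGetD_cons_shift b _ _ _ (by omega),
              pvGetD_cons_shift a _ _ _ (by omega),
              pvGetD_cons_shift b _ _ _ hpos])
      rw [hcong, ih (acc ++ [b, a]) (by simp at h; omega)]
      simp [pvPairsSwap]

-- on odd length, swapping all pairs = swapping the pairs of the body and keeping the last char
theorem pvPairs_odd : ∀ (cs : List Char) (h : cs.length % 2 = 1),
    pvPairsSwap cs = pvPairsSwap cs.dropLast ++ [cs.getLast (by intro hnil; simp [hnil] at h)] := by
  intro cs
  induction cs using pvPairsSwap.induct with
  | case1 => intro h; simp at h
  | case2 a => intro h; simp [pvPairsSwap]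
  | case3 a b rest ih =>
      intro h
      have hr : rest.length % 2 = 1 := by simp at h; omega
      have hrn : rest ≠ [] := by intro hnil; simp [hnil] at hr
      have hd : (a :: b :: rest).dropLast = a :: b :: rest.dropLast := by
        rw [List.dropLast_cons₂, List.dropLast_cons_of_ne_nil hrn]
      rw [hd]
      have hg : (a :: b :: rest).getLast (by simp) = rest.getLast hrn := by
        simp [List.getLast_cons hrn]
      simp only [pvPairsSwap, ih hr, hg]
      simp

theorem switch_pairs_spec : Claim_equal_switch_pairs := by
  intro st _
  unfold Spec_switch_pairs switch_pairs switch_pairs_alt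
  simp only []
  set cs0 := st.toList with hcs0
  by_cases hodd : cs0.length % 2 = 1
  · -- odd length
    have hne : cs0 ≠ [] := by intro hnil; simp [hnil] at hodd
    have hb : ((cs0.length : Int) - 1) = ((cs0.length - 1 : Nat) : Int) := by
      have : 1 ≤ cs0.length := List.length_pos_iff.mpr hne
      omega
    have hslice : PySem.List.slice cs0 none (some ((cs0.length : Int) - 1)) = cs0.dropLast := by
      rw [hb, PySem.List.slice_to_natCast, ← List.dropLast_eq_take]
    have hif : (cs0.length % 2 == 1) = true := by simpa using hodd
    rw [if_pos hif]
    simp only [hslice, PySem.List.pyGetD_neg_one cs0 ' ' hne]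
    have hbody : cs0.dropLast.length % 2 = 0 := by
      have : 1 ≤ cs0.length := List.length_pos_iff.mpr hne
      simp [List.length_dropLast]
      omega
    rw [pvFold_even cs0.dropLast [] hbody, pvPairs_odd cs0 hodd]
    simp
  · -- even length
    have hif : (cs0.length % 2 == 1) = false := by simpa using hodd
    rw [if_neg (by simp [hif])]
    simp only []
    rw [pvFold_even cs0 [] (by omega)]
    simp
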